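-- pv_equiv track=rewrite | github.com/afsalmuhammedr/Road-Generation | traffic_optimizer_v3.py | get_valid_node
-- ===== SOURCE A (Python) =====
-- COST_OBSTACLE = 9999  # Effectively infinite (Buildings/Water)
--
-- def get_valid_node(grid, x, y, w, h):
--     """Finds nearest non-obstacle node."""
--     if 0 <= x < w and 0 <= y < h and grid[x][y] < COST_OBSTACLE:
--         return x, y
--
--     # Search outwards
--     for radius in range(1, 15):
--         for dx in range(-radius, radius + 1):
--             for dy in range(-radius, radius + 1):
--                 nx, ny = x + dx, y + dy
--                 if 0 <= nx < w and 0 <= ny < h: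
--                     if grid[nx][ny] < COST_OBSTACLE:
--                         return nx, ny
--     return None
-- ===== SOURCE B (Python) =====
-- COST_OBSTACLE = 9999  # Effectively infinite (Buildings/Water)
--
-- def get_valid_node(grid, x, y, w, h):
--     """Finds nearest non-obstacle node within a Chebyshev radius of 14."""
--     offsets = [(dx, dy)
--                for dx in range(-14, 15) for dy in range(-14, 15)
--                if 0 <= x + dx < w and 0 <= y + dy < h
--                and grid[x + dx][y + dy] < COST_OBSTACLE]
--     if not offsets:
--         return None
--     dx, dy = min(offsets, key=lambda o: (max(abs(o[0]), abs(o[1])), o))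
--     return x + dx, y + dy
-- ===== Notes on version B (the rewrite author's own statement) =====
-- stated objective: alternative
-- what changed: A scans outward over expanding (2r+1)x(2r+1) boxes for r=1..14 and returns the first valid cell it meets; B enumerates the fixed +/-14 box once, collects all in-bounds non-obstacle offsets, and returns the one minimizing the tuple key (Chebyshev distance, dx, dy), which provably coincides with A's first hit; Pre_ excludes grids too small (or ragged) for the w,h bounds over the box, where indexing raises IndexError.
-- outside the precondition, e.g. on get_valid_node([[0]], 0, 0, 2, 1): A returns (0, 0), B raises IndexError
import Mathlib
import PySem

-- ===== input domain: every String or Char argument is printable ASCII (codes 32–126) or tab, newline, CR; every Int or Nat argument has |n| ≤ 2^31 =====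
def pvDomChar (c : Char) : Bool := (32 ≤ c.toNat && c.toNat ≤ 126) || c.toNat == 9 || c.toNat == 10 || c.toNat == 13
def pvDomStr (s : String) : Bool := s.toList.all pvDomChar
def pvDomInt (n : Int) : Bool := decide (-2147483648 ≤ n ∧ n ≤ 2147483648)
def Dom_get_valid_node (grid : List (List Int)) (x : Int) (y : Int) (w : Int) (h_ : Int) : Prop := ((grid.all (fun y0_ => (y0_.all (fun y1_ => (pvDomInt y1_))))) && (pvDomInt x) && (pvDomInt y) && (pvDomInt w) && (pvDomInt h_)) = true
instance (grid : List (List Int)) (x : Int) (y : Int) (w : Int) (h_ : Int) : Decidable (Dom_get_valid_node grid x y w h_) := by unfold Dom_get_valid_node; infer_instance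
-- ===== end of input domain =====

-- B replaces A's expanding-box rescan (first hit wins) by one pass over the fixed ±14 box
-- selecting the minimum under the key (Chebyshev distance, dx, dy) — a different selection algorithm of similar cost.


-- ===== PORT A =====
-- grid[nx][ny] (Python chained indexing); none = IndexError, excluded by Pre_
def pvCell (grid : List (List Int)) (nx ny : Int) : Option Int :=
  (PySem.List.pyGet? grid nx).bind (fun row => PySem.List.pyGet? row ny)

-- '0 <= nx < w and 0 <= ny < h and grid[nx][ny] < COST_OBSTACLE'; the none (IndexError) case
-- is unreachable inside Pre_ and mapped to false
def pvOk (grid : List (List Int)) (w h_ nx ny : Int) : Bool :=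
  decide (0 ≤ nx) && decide (nx < w) && decide (0 ≤ ny) && decide (ny < h_) &&
    (match pvCell grid nx ny with
     | some c => decide (c < 9999)
     | none => false)

def get_valid_node (grid : List (List Int)) (x : Int) (y : Int) (w : Int) (h_ : Int) : Option (Int × Int) :=
  if pvOk grid w h_ x y then some (x, y)
  else
    (PySem.List.pyRange 1 15 1).findSome? (fun radius =>
      (PySem.List.pyRange (-radius) (radius + 1) 1).findSome? (fun dx =>
        (PySem.List.pyRange (-radius) (radius + 1) 1).findSome? (fun dy =>
          if pvOk grid w h_ (x + dx) (y + dy) then some (x + dx, y + dy) else none)))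

-- ===== PORT B =====
-- Source B's key lambda o: (max(abs(o[0]), abs(o[1])), o) — the triple (Chebyshev distance, dx, dy)
def pvOffKey (o : Int × Int) : Int × Int × Int :=
  (((max o.1.natAbs o.2.natAbs : Nat) : Int), o.1, o.2)

-- Python's lexicographic '<' on these triples (Mathlib's '<' on products is pointwise, so spell it out)
def pvLtTriple (a b : Int × Int × Int) : Bool :=
  a.1 < b.1 || (a.1 == b.1 && (a.2.1 < b.2.1 || (a.2.1 == b.2.1 && a.2.2 < b.2.2)))

-- Python's min(offsets, key=…): first element with minimal key; exact hand port as the running-min loop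
def pvMinByKey (l : List (Int × Int)) : Option (Int × Int) :=
  l.foldl (fun acc o => match acc with
    | none => some o
    | some m => if pvLtTriple (pvOffKey o) (pvOffKey m) then some o else some m) none

def get_valid_node_alt (grid : List (List Int)) (x : Int) (y : Int) (w : Int) (h_ : Int) : Option (Int × Int) :=
  match pvMinByKey
      ((PySem.List.pyRange (-14) 15 1).flatMap (fun dx =>
        (PySem.List.pyRange (-14) 15 1).filterMap (fun dy =>
          if pvOk grid w h_ (x + dx) (y + dy) then some (dx, dy) else none))) with
  | none => none
  | some o => some (x + o.1, y + o.2)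

-- ===== PRECONDITION & SPEC =====
-- Pre_ excludes inputs where some in-bounds (per w,h) cell of the ±14 box around (x,y) lies outside
-- the actual (possibly ragged or undersized) grid: there indexing grid[nx][ny] raises IndexError —
-- B's single full-box pass always raises, and A raises unless a valid cell happens to come earlier
-- in its outward scan.
def Pre_get_valid_node (grid : List (List Int)) (x : Int) (y : Int) (w : Int) (h_ : Int) : Prop :=
  max 0 (y - 14) < min h_ (y + 15) →
    ∀ nx ∈ PySem.List.pyRange (max 0 (x - 14)) (min w (x + 15)) 1,
      nx < (grid.length : Int) ∧ min h_ (y + 15) ≤ ((grid.getD nx.toNat []).length : Int)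
instance (grid : List (List Int)) (x : Int) (y : Int) (w : Int) (h_ : Int) : Decidable (Pre_get_valid_node grid x y w h_) := by unfold Pre_get_valid_node; infer_instance

def pvWitness_get_valid_node : List (List Int) × Int × Int × Int × Int := ([[0]], 0, 0, 1, 1)

def Spec_get_valid_node (grid : List (List Int)) (x : Int) (y : Int) (w : Int) (h_ : Int) (out : Option (Int × Int)) : Prop := out = get_valid_node_alt grid x y w h_
instance (grid : List (List Int)) (x : Int) (y : Int) (w : Int) (h_ : Int) (out : Option (Int × Int)) : Decidable (Spec_get_valid_node grid x y w h_ out) := by unfold Spec_get_valid_node; infer_instance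

-- ===== CLAIM (what is proved, stated in full; the proofs are below) =====
def Claim_equal_get_valid_node : Prop := ∀ (grid : List (List Int)) (x : Int) (y : Int) (w : Int) (h_ : Int), Dom_get_valid_node grid x y w h_ → Pre_get_valid_node grid x y w h_ → Spec_get_valid_node grid x y w h_ (get_valid_node grid x y w h_)

-- ===== LEMMAS AND PROOFS =====

-- the scalar key order-isomorphic to (Chebyshev, dx, dy) on the ±14 box; proof device only
def pvKey (dx dy : Int) : Int := ((max dx.natAbs dy.natAbs : Nat) : Int) * 10000 + dx * 100 + dy

-- the common validity test, as a predicate on OFFSETS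
def pvV (grid : List (List Int)) (x y w h_ : Int) (p : Int × Int) : Bool :=
  pvOk grid w h_ (x + p.1) (y + p.2)

-- A's scan of the full box of radius r, on offsets
def pvBoxScan (v : Int × Int → Bool) (r : Int) : Option (Int × Int) :=
  (PySem.List.pyRange (-r) (r + 1) 1).findSome? (fun dx =>
    (PySem.List.pyRange (-r) (r + 1) 1).findSome? (fun dy =>
      if v (dx, dy) then some (dx, dy) else none))

-- B's candidate list, on offsets
def pvCands (v : Int × Int → Bool) : List (Int × Int) :=
  (PySem.List.pyRange (-14) 15 1).flatMap (fun dx =>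
    (PySem.List.pyRange (-14) 15 1).filterMap (fun dy =>
      if v (dx, dy) then some (dx, dy) else none))

def pvAcore (v : Int × Int → Bool) : Option (Int × Int) :=
  if v (0, 0) then some (0, 0)
  else (PySem.List.pyRange 1 15 1).findSome? (fun r => pvBoxScan v r)

def pvBcore (v : Int × Int → Bool) : Option (Int × Int) :=
  PySem.List.min? (pvCands v) (fun p => pvKey p.1 p.2)

lemma pvMap_findSome? {α β γ : Type} (g : β → γ) (f : α → Option β) (l : List α) :
    (l.findSome? f).map g = l.findSome? (fun a => (f a).map g) := by
  induction l with
  | nil => rfl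
  | cons a t ih =>
    rw [List.findSome?_cons, List.findSome?_cons]
    cases f a <;> simp [ih]

lemma pvFindSome?_range_first {α : Type} (a b c : Int) (f : Int → Option α) (z : α)
    (hac : a ≤ c) (hcb : c < b) (hnone : ∀ i, a ≤ i → i < c → f i = none) (hc : f c = some z) :
    (PySem.List.pyRange a b 1).findSome? f = some z := by
  rw [PySem.List.pyRange_one_append a c b hac (le_of_lt hcb), List.findSome?_append]
  have h1 : (PySem.List.pyRange a c 1).findSome? f = none :=
    List.findSome?_eq_none_iff.mpr (fun i hi => by
      have h := PySem.List.mem_pyRange_one.mp hi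
      exact hnone i h.1 h.2)
  rw [h1, Option.none_or, PySem.List.pyRange_one_cons hcb, List.findSome?_cons, hc]

lemma mem_pvCands {v : Int × Int → Bool} {p : Int × Int} :
    p ∈ pvCands v ↔ (-14 ≤ p.1 ∧ p.1 ≤ 14 ∧ -14 ≤ p.2 ∧ p.2 ≤ 14 ∧ v p = true) := by
  obtain ⟨d1, d2⟩ := p
  simp only [pvCands, List.mem_flatMap, List.mem_filterMap, PySem.List.mem_pyRange_one]
  constructor
  · rintro ⟨dx, hdx, dy, hdy, hif⟩
    split at hif
    · simp only [Option.some.injEq, Prod.mk.injEq] at hif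
      obtain ⟨rfl, rfl⟩ := hif
      refine ⟨hdx.1, by omega, hdy.1, by omega, by assumption⟩
    · simp at hif
  · rintro ⟨h1, h2, h3, h4, hv⟩
    exact ⟨d1, ⟨h1, by omega⟩, d2, ⟨h3, by omega⟩, by simp [hv]⟩

-- on the ±14 box the lexicographic triple order IS the scalar-key order
lemma pvLt_iff_key {a b : Int × Int} (ha1 : -14 ≤ a.1) (ha2 : a.1 ≤ 14) (ha3 : -14 ≤ a.2)
    (ha4 : a.2 ≤ 14) (hb1 : -14 ≤ b.1) (hb2 : b.1 ≤ 14) (hb3 : -14 ≤ b.2) (hb4 : b.2 ≤ 14) :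
    pvLtTriple (pvOffKey a) (pvOffKey b) = decide (pvKey a.1 a.2 < pvKey b.1 b.2) := by
  obtain ⟨a1, a2⟩ := a
  obtain ⟨b1, b2⟩ := b
  rw [Bool.eq_iff_iff]
  simp only [pvLtTriple, pvOffKey, pvKey, Bool.or_eq_true, Bool.and_eq_true, decide_eq_true_eq,
    beq_iff_eq]
  simp only at ha1 ha2 ha3 ha4 hb1 hb2 hb3 hb4
  constructor
  · rintro (h | ⟨he, h | ⟨he2, h⟩⟩) <;> omega
  · intro h
    omega

-- the running-min loop with the lexicographic comparison computes min? with the scalar key,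
-- provided all elements (and the accumulator) come from the candidate list
lemma pvMinByKey_eq_min? (v : Int × Int → Bool) :
    pvMinByKey (pvCands v) = PySem.List.min? (pvCands v) (fun p => pvKey p.1 p.2) := by
  unfold pvMinByKey PySem.List.min?
  have main : ∀ (l : List (Int × Int)) (acc : Option (Int × Int)),
      (∀ p ∈ l, p ∈ pvCands v) → (∀ p, acc = some p → p ∈ pvCands v) →
      l.foldl (fun acc o => match acc with
        | none => some o
        | some m => if pvLtTriple (pvOffKey o) (pvOffKey m) then some o else some m) acc
      = l.foldl (fun acc o => match acc with
        | none => some o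
        | some m => if pvKey o.1 o.2 < pvKey m.1 m.2 then some o else some m) acc := by
    intro l
    induction l with
    | nil => intro acc _ _; rfl
    | cons a t ih =>
      intro acc hl hacc
      have hac : a ∈ pvCands v := hl a (List.mem_cons_self)
      have hab := mem_pvCands.mp hac
      cases acc with
      | none =>
        simp only [List.foldl_cons]
        exact ih (some a) (fun p hp => hl p (List.mem_cons_of_mem _ hp)) (fun p hp => by
          cases hp; exact hac)
      | some m =>
        have hmc : m ∈ pvCands v := hacc m rfl
        have hmb := mem_pvCands.mp hmc
        have hcmp := pvLt_iff_key hab.1 hab.2.1 hab.2.2.1 hab.2.2.2.1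
          hmb.1 hmb.2.1 hmb.2.2.1 hmb.2.2.2.1
        simp only [List.foldl_cons, hcmp]
        by_cases hk : pvKey a.1 a.2 < pvKey m.1 m.2
        · rw [if_pos (by simpa using hk), if_pos hk]
          exact ih (some a) (fun p hp => hl p (List.mem_cons_of_mem _ hp)) (fun p hp => by
            cases hp; exact hac)
        · rw [if_neg (by simpa using hk), if_neg hk]
          exact ih (some m) (fun p hp => hl p (List.mem_cons_of_mem _ hp)) (fun p hp => by
            cases hp; exact hmc)
  refine (main (pvCands v) none (fun p hp => hp) (fun p hp => by cases hp)).trans ?_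
  congr 1
  funext acc o
  cases acc <;> simp

lemma pvBoxScan_eq_none {v : Int × Int → Bool} {r : Int}
    (h : ∀ p : Int × Int, -r ≤ p.1 → p.1 ≤ r → -r ≤ p.2 → p.2 ≤ r → v p = false) :
    pvBoxScan v r = none := by
  unfold pvBoxScan
  rw [List.findSome?_eq_none_iff]
  intro dx hdx
  rw [List.findSome?_eq_none_iff]
  intro dy hdy
  have h1 := PySem.List.mem_pyRange_one.mp hdx
  have h2 := PySem.List.mem_pyRange_one.mp hdy
  have := h (dx, dy) h1.1 (by omega) h2.1 (by omega)
  simp [this]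

lemma pvBoxScan_eq_some {v : Int × Int → Bool} {r m1 m2 : Int}
    (hb1 : -r ≤ m1) (hb2 : m1 ≤ r) (hb3 : -r ≤ m2) (hb4 : m2 ≤ r)
    (hv : v (m1, m2) = true)
    (hmin : ∀ p : Int × Int, -r ≤ p.1 → p.1 ≤ r → -r ≤ p.2 → p.2 ≤ r → v p = true →
      (m1 < p.1 ∨ (m1 = p.1 ∧ m2 ≤ p.2))) :
    pvBoxScan v r = some (m1, m2) := by
  unfold pvBoxScan
  apply pvFindSome?_range_first (c := m1) _ _ _ _ hb1 (by omega)
  · intro dx h1 h2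
    rw [List.findSome?_eq_none_iff]
    intro dy hdy
    have h3 := PySem.List.mem_pyRange_one.mp hdy
    have hvf : v (dx, dy) = false := by
      cases hcase : v (dx, dy) with
      | false => rfl
      | true =>
        have := hmin (dx, dy) (by omega) (by omega) h3.1 (by omega) hcase
        simp at this; omega
    simp [hvf]
  · apply pvFindSome?_range_first (c := m2) _ _ _ _ hb3 (by omega)
    · intro dy h1 h2
      have hvf : v (m1, dy) = false := by
        cases hcase : v (m1, dy) with
        | false => rfl
        | true =>
          have := hmin (m1, dy) hb1 hb2 (by omega) (by omega) hcase
          simp at this; omega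
      simp [hvf]
    · simp [hv]

lemma pvCore_eq (v : Int × Int → Bool) : pvAcore v = pvBcore v := by
  unfold pvAcore pvBcore
  by_cases h0 : v (0, 0) = true
  · rw [if_pos h0]
    rcases hmin : PySem.List.min? (pvCands v) (fun p => pvKey p.1 p.2) with _ | m
    · exfalso
      have hnil := (PySem.List.min?_eq_none_iff _ _).mp hmin
      have : ((0 : Int), (0 : Int)) ∈ pvCands v :=
        mem_pvCands.mpr ⟨by omega, by omega, by omega, by omega, h0⟩
      rw [hnil] at this
      simp at this
    · have hm := mem_pvCands.mp (PySem.List.min?_mem hmin)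
      have hle := PySem.List.min?_isMin hmin ((0 : Int), (0 : Int))
        (mem_pvCands.mpr ⟨by omega, by omega, by omega, by omega, h0⟩)
      obtain ⟨m1, m2⟩ := m
      have : m1 = 0 ∧ m2 = 0 := by
        simp only [pvKey] at hle
        obtain ⟨b1, b2, b3, b4, -⟩ := hm
        simp only at b1 b2 b3 b4
        omega
      obtain ⟨rfl, rfl⟩ := this
      rfl
  · rw [if_neg h0]
    rcases hmin : PySem.List.min? (pvCands v) (fun p => pvKey p.1 p.2) with _ | m
    · have hnil := (PySem.List.min?_eq_none_iff _ _).mp hmin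
      have hnov : ∀ p : Int × Int, -14 ≤ p.1 → p.1 ≤ 14 → -14 ≤ p.2 → p.2 ≤ 14 → v p = false := by
        intro p h1 h2 h3 h4
        cases hcase : v p with
        | false => rfl
        | true =>
          have : p ∈ pvCands v := mem_pvCands.mpr ⟨h1, h2, h3, h4, hcase⟩
          rw [hnil] at this; simp at this
      rw [List.findSome?_eq_none_iff]
      intro r hr
      have hr' := PySem.List.mem_pyRange_one.mp hr
      exact pvBoxScan_eq_none (fun p h1 h2 h3 h4 =>
        hnov p (by omega) (by omega) (by omega) (by omega))
    · obtain ⟨m1, m2⟩ := m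
      have hm := mem_pvCands.mp (PySem.List.min?_mem hmin)
      obtain ⟨b1, b2, b3, b4, hv⟩ := hm
      simp only at b1 b2 b3 b4 hv
      have hkmin := PySem.List.min?_isMin hmin
      have hne : ¬(m1 = 0 ∧ m2 = 0) := by
        rintro ⟨rfl, rfl⟩; rw [hv] at h0; exact h0 rfl
      apply pvFindSome?_range_first (c := ((max m1.natAbs m2.natAbs : Nat) : Int))
        _ _ _ _ (by omega) (by omega)
      · intro i hi1 hi2
        apply pvBoxScan_eq_none
        intro p h1 h2 h3 h4
        cases hcase : v p with
        | false => rfl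
        | true =>
          exfalso
          have hpc : p ∈ pvCands v :=
            mem_pvCands.mpr ⟨by omega, by omega, by omega, by omega, hcase⟩
          have hk := hkmin p hpc
          simp only [pvKey] at hk
          omega
      · apply pvBoxScan_eq_some (by omega) (by omega) (by omega) (by omega) hv
        intro p h1 h2 h3 h4 hvp
        have hpc : p ∈ pvCands v :=
          mem_pvCands.mpr ⟨by omega, by omega, by omega, by omega, hvp⟩
        have hk := hkmin p hpc
        simp only [pvKey] at hk
        omega

lemma pvPortA_eq (grid : List (List Int)) (x y w h_ : Int) :
    get_valid_node grid x y w h_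
      = (pvAcore (pvV grid x y w h_)).map (fun p => (x + p.1, y + p.2)) := by
  have e0 : pvV grid x y w h_ (0, 0) = pvOk grid w h_ x y := by simp [pvV]
  unfold get_valid_node pvAcore
  rw [e0]
  by_cases h0 : pvOk grid w h_ x y = true
  · rw [if_pos h0, if_pos h0]; simp
  · rw [if_neg h0, if_neg h0, pvMap_findSome?]
    congr 1
    funext r
    unfold pvBoxScan
    rw [pvMap_findSome?]
    congr 1
    funext dx
    rw [pvMap_findSome?]
    congr 1
    funext dy
    unfold pvV
    split <;> simp

lemma pvPortB_eq (grid : List (List Int)) (x y w h_ : Int) :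
    get_valid_node_alt grid x y w h_
      = (pvBcore (pvV grid x y w h_)).map (fun p => (x + p.1, y + p.2)) := by
  have hc : ((PySem.List.pyRange (-14) 15 1).flatMap (fun dx =>
        (PySem.List.pyRange (-14) 15 1).filterMap (fun dy =>
          if pvOk grid w h_ (x + dx) (y + dy) then some (dx, dy) else none)))
      = pvCands (pvV grid x y w h_) := by
    unfold pvCands pvV
    rfl
  unfold get_valid_node_alt pvBcore
  rw [hc, pvMinByKey_eq_min?]
  rcases PySem.List.min? (pvCands (pvV grid x y w h_)) (fun p => pvKey p.1 p.2) with _ | m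
  · rfl
  · rfl

-- ===== VERDICT (by name: the statement is the Claim_ definition above) =====
theorem get_valid_node_spec : Claim_equal_get_valid_node := by
  intro grid x y w h_ _ _
  unfold Spec_get_valid_node
  rw [pvPortA_eq, pvPortB_eq, pvCore_eq]
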